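-- pv_equiv track=rewrite | github.com/gopal-jogi/pyspider | function/emripno.py | noEmrip
-- ===== SOURCE A (Python) =====
-- def noEmrip(num,Copy,rev=0,fc=0,fv=0):
--     while(num!=0):
--         rem=num%10
--         rev=rev*10+rem
--         num//=10
--     for v in range(1,Copy+1):
--         if (Copy%v==0):
--             fc+=1
--     for v in range(1,rev+1):
--         if (rev%v==0):
--             fv+=1
--     return Copy!=rev and fc==2 and fv==2
-- ===== SOURCE B (Python) =====
-- def _ndiv(n):
--     # number of positive divisors of n (0 for n <= 0), by trial division up to sqrt(n)
--     if n <= 0: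
--         return 0
--     cnt = 0
--     i = 1
--     while i * i <= n:
--         if n % i == 0:
--             cnt += 1 if i * i == n else 2
--         i += 1
--     return cnt
--
-- def noEmrip(num, Copy, rev=0, fc=0, fv=0):
--     while num != 0:
--         rem = num % 10
--         rev = rev * 10 + rem
--         num //= 10
--     return Copy != rev and fc + _ndiv(Copy) == 2 and fv + _ndiv(rev) == 2
-- ===== Notes on version B (the rewrite author's own statement) =====
-- stated objective: faster
-- what changed: A counts divisors of Copy and of the reversed number by scanning every v in 1..n; B counts divisors by trial division only up to sqrt(n), adding 2 per divisor pair (1 for a square root), and compares fc/fv plus that count to 2.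
import Mathlib
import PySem

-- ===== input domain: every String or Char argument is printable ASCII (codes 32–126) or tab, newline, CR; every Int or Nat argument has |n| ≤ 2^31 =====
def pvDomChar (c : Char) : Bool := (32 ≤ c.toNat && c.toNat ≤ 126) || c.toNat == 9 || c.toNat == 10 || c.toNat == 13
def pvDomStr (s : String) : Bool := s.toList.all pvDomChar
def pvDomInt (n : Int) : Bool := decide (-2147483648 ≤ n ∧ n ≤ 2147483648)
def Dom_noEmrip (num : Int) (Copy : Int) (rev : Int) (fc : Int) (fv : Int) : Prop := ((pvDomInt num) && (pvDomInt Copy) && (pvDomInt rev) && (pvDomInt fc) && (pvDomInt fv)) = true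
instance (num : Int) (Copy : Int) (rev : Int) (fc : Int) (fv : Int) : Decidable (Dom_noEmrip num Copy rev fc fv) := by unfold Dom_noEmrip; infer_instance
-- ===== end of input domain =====

-- B replaces A's two O(n) divisor-counting scans by trial division up to √n; the digit-reversal loop is unchanged.

-- ===== PORT A =====
-- the digit-reversal while-loop, identical in both Pythons; fuel num.toNat suffices for every num ≥ 0
def revLoop (fuel : Nat) (num rev : Int) : Int :=
  match fuel with
  | 0 => rev
  | f + 1 =>
    if num = 0 then rev
    else revLoop f (PySem.Int.floordiv num 10) (rev * 10 + PySem.Int.mod num 10)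

def noEmrip (num : Int) (Copy : Int) (rev : Int) (fc : Int) (fv : Int) : Bool :=
  let r := revLoop num.toNat num rev
  let fc' := (PySem.List.pyRange 1 (Copy + 1) 1).foldl
    (fun a v => if PySem.Int.mod Copy v = 0 then a + 1 else a) fc
  let fv' := (PySem.List.pyRange 1 (r + 1) 1).foldl
    (fun a v => if PySem.Int.mod r v = 0 then a + 1 else a) fv
  decide (Copy ≠ r) && decide (fc' = 2) && decide (fv' = 2)

-- ===== PORT B =====
def ndivLoop (n i cnt : Int) : Int :=
  if h : i * i ≤ n then
    ndivLoop n (i + 1)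
      (if PySem.Int.mod n i = 0 then (if i * i = n then cnt + 1 else cnt + 2) else cnt)
  else cnt
termination_by (n + 1 - i).toNat
decreasing_by
  have hin : i ≤ n := by nlinarith [sq_nonneg i]
  omega

def ndiv (n : Int) : Int := if n ≤ 0 then 0 else ndivLoop n 1 0

def noEmrip_alt (num : Int) (Copy : Int) (rev : Int) (fc : Int) (fv : Int) : Bool :=
  let r := revLoop num.toNat num rev
  decide (Copy ≠ r) && decide (fc + ndiv Copy = 2) && decide (fv + ndiv r = 2)

-- ===== PRECONDITION & SPEC =====
def Spec_noEmrip (num : Int) (Copy : Int) (rev : Int) (fc : Int) (fv : Int) (out : Bool) : Prop := out = noEmrip_alt num Copy rev fc fv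
instance (num : Int) (Copy : Int) (rev : Int) (fc : Int) (fv : Int) (out : Bool) : Decidable (Spec_noEmrip num Copy rev fc fv out) := by unfold Spec_noEmrip; infer_instance

-- ===== CLAIM (what is proved, stated in full; the proofs are below) =====
def Claim_equal_noEmrip : Prop := ∀ (num : Int) (Copy : Int) (rev : Int) (fc : Int) (fv : Int), Dom_noEmrip num Copy rev fc fv → Spec_noEmrip num Copy rev fc fv (noEmrip num Copy rev fc fv)

-- ===== LEMMAS AND PROOFS =====

-- the summand counted by B's √n loop
def gdiv (C j : Int) : Int :=
  if j * j ≤ C then (if PySem.Int.mod C j = 0 then (if j * j = C then 1 else 2) else 0) else 0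

lemma Icc_insert_top (a b : Int) (h : a ≤ b) :
    Finset.Icc a b = insert b (Finset.Icc a (b - 1)) := by
  ext x; simp [Finset.mem_Icc]; omega

lemma Icc_insert_bot (a b : Int) (h : a ≤ b) :
    Finset.Icc a b = insert a (Finset.Icc (a + 1) b) := by
  ext x; simp [Finset.mem_Icc]; omega

-- A's for-loop as a sum over Icc 1 b
lemma Afold (p : Int → Prop) [DecidablePred p] : ∀ (n : Nat) (b fc : Int), b.toNat = n →
    (PySem.List.pyRange 1 (b + 1) 1).foldl (fun a v => if p v then a + 1 else a) fc
      = fc + ∑ j ∈ Finset.Icc 1 b, (if p j then (1 : Int) else 0) := by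
  intro n
  induction n with
  | zero =>
    intro b fc hb
    rw [PySem.List.pyRange_one_eq_nil (by omega)]
    rw [Finset.Icc_eq_empty (by omega)]
    simp
  | succ m ih =>
    intro b fc hb
    have hb1 : (1 : Int) ≤ b := by omega
    rw [PySem.List.pyRange_one_succ_right (by omega), List.foldl_append]
    have : PySem.List.pyRange 1 b 1 = PySem.List.pyRange 1 ((b - 1) + 1) 1 := by ring_nf
    rw [this, ih (b - 1) fc (by omega)]
    rw [Icc_insert_top 1 b hb1, Finset.sum_insert (by simp [Finset.mem_Icc])]
    simp only [List.foldl_cons, List.foldl_nil]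
    split <;> ring

-- B's √n loop as a sum over Icc i C
lemma ndivLoop_eq (C : Int) : ∀ (m : Nat) (i cnt : Int), 1 ≤ i → (C + 1 - i).toNat = m →
    ndivLoop C i cnt = cnt + ∑ j ∈ Finset.Icc i C, gdiv C j := by
  intro m
  induction m with
  | zero =>
    intro i cnt hi hm
    rw [ndivLoop]
    have : ¬ (i * i ≤ C) := by
      intro hcon
      have : i ≤ C := by nlinarith
      omega
    rw [dif_neg this, Finset.Icc_eq_empty (by omega)]
    simp
  | succ m ih =>
    intro i cnt hi hm
    rw [ndivLoop]
    by_cases h : i * i ≤ C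
    · have hiC : i ≤ C := by nlinarith
      rw [dif_pos h, ih (i + 1) _ (by omega) (by omega)]
      rw [Icc_insert_bot i C hiC, Finset.sum_insert (by simp [Finset.mem_Icc])]
      unfold gdiv
      rw [if_pos h]
      split_ifs <;> ring
    · rw [dif_neg h]
      have hz : ∑ j ∈ Finset.Icc i C, gdiv C j = 0 := by
        apply Finset.sum_eq_zero
        intro j hj
        rw [Finset.mem_Icc] at hj
        unfold gdiv
        have : ¬ (j * j ≤ C) := by nlinarith
        rw [if_neg this]
      rw [hz]; ring

-- flipping a large divisor to a small one
lemma pair_flip {C a : Int} (hC : 1 ≤ C) (ha1 : 1 ≤ a) (hd : a ∣ C) (hlt : C < a * a) :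
    (C / a) ∣ C ∧ 1 ≤ C / a ∧ C / a ≤ C ∧ (C / a) * (C / a) < C ∧ C / (C / a) = a := by
  obtain ⟨b, hb⟩ := hd
  have ha0 : a ≠ 0 := by omega
  have hba : C / a = b := by rw [hb, Int.mul_ediv_cancel_left _ ha0]
  have hb1 : 1 ≤ b := by nlinarith
  refine ⟨⟨a, by rw [hba, hb]; ring⟩, by omega, ?_, ?_, ?_⟩
  · rw [hba]; nlinarith
  · rw [hba]; nlinarith
  · rw [hba, hb, mul_comm, Int.mul_ediv_cancel_left _ (by omega)]

-- flipping a small divisor to a large one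
lemma pair_flip' {C a : Int} (hC : 1 ≤ C) (ha1 : 1 ≤ a) (hd : a ∣ C) (hlt : a * a < C) :
    (C / a) ∣ C ∧ 1 ≤ C / a ∧ C / a ≤ C ∧ C < (C / a) * (C / a) ∧ C / (C / a) = a := by
  obtain ⟨b, hb⟩ := hd
  have ha0 : a ≠ 0 := by omega
  have hba : C / a = b := by rw [hb, Int.mul_ediv_cancel_left _ ha0]
  have hb1 : 1 ≤ b := by nlinarith
  refine ⟨⟨a, by rw [hba, hb]; ring⟩, by omega, ?_, ?_, ?_⟩
  · rw [hba]; nlinarith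
  · rw [hba]; nlinarith
  · rw [hba, hb, mul_comm, Int.mul_ediv_cancel_left _ (by omega)]

-- the two strict halves have the same count
lemma sum_hi_eq_lo (C : Int) (hC : 1 ≤ C) :
    ∑ j ∈ Finset.Icc 1 C, (if PySem.Int.mod C j = 0 ∧ C < j * j then (1 : Int) else 0)
      = ∑ j ∈ Finset.Icc 1 C, (if PySem.Int.mod C j = 0 ∧ j * j < C then (1 : Int) else 0) := by
  have hcard : (Finset.filter (fun j => PySem.Int.mod C j = 0 ∧ C < j * j) (Finset.Icc 1 C)).card
      = (Finset.filter (fun j => PySem.Int.mod C j = 0 ∧ j * j < C) (Finset.Icc 1 C)).card := by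
    apply Finset.card_nbij' (i := fun j => C / j) (j := fun j => C / j)
    · intro a ha
      simp only [Finset.coe_filter, Finset.mem_Icc, Set.mem_setOf_eq] at ha ⊢
      obtain ⟨⟨ha1, _⟩, hm, hlt⟩ := ha
      have hd : a ∣ C := (PySem.Int.mod_eq_zero_iff_dvd C a).mp hm
      obtain ⟨d1, d2, d3, d4, _⟩ := pair_flip hC ha1 hd hlt
      exact ⟨⟨d2, d3⟩, (PySem.Int.mod_eq_zero_iff_dvd C _).mpr d1, d4⟩
    · intro a ha
      simp only [Finset.coe_filter, Finset.mem_Icc, Set.mem_setOf_eq] at ha ⊢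
      obtain ⟨⟨ha1, _⟩, hm, hlt⟩ := ha
      have hd : a ∣ C := (PySem.Int.mod_eq_zero_iff_dvd C a).mp hm
      obtain ⟨d1, d2, d3, d4, _⟩ := pair_flip' hC ha1 hd hlt
      exact ⟨⟨d2, d3⟩, (PySem.Int.mod_eq_zero_iff_dvd C _).mpr d1, d4⟩
    · intro a ha
      simp only [Finset.coe_filter, Finset.mem_Icc, Set.mem_setOf_eq] at ha
      obtain ⟨⟨ha1, _⟩, hm, hlt⟩ := ha
      exact (pair_flip hC ha1 ((PySem.Int.mod_eq_zero_iff_dvd C a).mp hm) hlt).2.2.2.2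
    · intro a ha
      simp only [Finset.coe_filter, Finset.mem_Icc, Set.mem_setOf_eq] at ha
      obtain ⟨⟨ha1, _⟩, hm, hlt⟩ := ha
      exact (pair_flip' hC ha1 ((PySem.Int.mod_eq_zero_iff_dvd C a).mp hm) hlt).2.2.2.2
  rw [Finset.sum_boole, Finset.sum_boole, hcard]

-- divisor-count = √n-count
lemma count_eq_ndiv (C : Int) (hC : 1 ≤ C) :
    ∑ j ∈ Finset.Icc 1 C, (if PySem.Int.mod C j = 0 then (1 : Int) else 0)
      = ∑ j ∈ Finset.Icc 1 C, gdiv C j := by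
  have hpt : ∀ j : Int, gdiv C j
      = (if PySem.Int.mod C j = 0 ∧ j * j ≤ C then (1 : Int) else 0)
        + (if PySem.Int.mod C j = 0 ∧ j * j < C then (1 : Int) else 0) := by
    intro j
    unfold gdiv
    rcases lt_trichotomy (j * j) C with h | h | h <;> split_ifs <;> omega
  have hpt' : ∀ j : Int, (if PySem.Int.mod C j = 0 then (1 : Int) else 0)
      = (if PySem.Int.mod C j = 0 ∧ j * j ≤ C then (1 : Int) else 0)
        + (if PySem.Int.mod C j = 0 ∧ C < j * j then (1 : Int) else 0) := by
    intro j
    rcases lt_trichotomy (j * j) C with h | h | h <;> split_ifs <;> omega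
  calc ∑ j ∈ Finset.Icc 1 C, (if PySem.Int.mod C j = 0 then (1 : Int) else 0)
      = ∑ j ∈ Finset.Icc 1 C, ((if PySem.Int.mod C j = 0 ∧ j * j ≤ C then (1 : Int) else 0)
          + (if PySem.Int.mod C j = 0 ∧ C < j * j then (1 : Int) else 0)) :=
        Finset.sum_congr rfl (fun j _ => hpt' j)
    _ = ∑ j ∈ Finset.Icc 1 C, (if PySem.Int.mod C j = 0 ∧ j * j ≤ C then (1 : Int) else 0)
          + ∑ j ∈ Finset.Icc 1 C, (if PySem.Int.mod C j = 0 ∧ C < j * j then (1 : Int) else 0) :=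
        Finset.sum_add_distrib
    _ = ∑ j ∈ Finset.Icc 1 C, (if PySem.Int.mod C j = 0 ∧ j * j ≤ C then (1 : Int) else 0)
          + ∑ j ∈ Finset.Icc 1 C, (if PySem.Int.mod C j = 0 ∧ j * j < C then (1 : Int) else 0) := by
        rw [sum_hi_eq_lo C hC]
    _ = ∑ j ∈ Finset.Icc 1 C, gdiv C j := by
        rw [← Finset.sum_add_distrib]
        exact Finset.sum_congr rfl (fun j _ => (hpt j).symm)

-- A's count fold equals fc + ndiv C, for every C
lemma fold_eq_ndiv (C fc : Int) :
    (PySem.List.pyRange 1 (C + 1) 1).foldl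
      (fun a v => if PySem.Int.mod C v = 0 then a + 1 else a) fc = fc + ndiv C := by
  by_cases hC : C ≤ 0
  · rw [PySem.List.pyRange_one_eq_nil (by omega)]
    unfold ndiv
    rw [if_pos hC]
    simp
  · have hC1 : (1 : Int) ≤ C := by omega
    rw [Afold _ C.toNat C fc rfl, count_eq_ndiv C hC1]
    unfold ndiv
    rw [if_neg hC, ndivLoop_eq C (C + 1 - 1).toNat 1 0 (by omega) rfl]
    ring

-- ===== VERDICT (by name: the statement is the Claim_ definition above) =====
theorem noEmrip_spec : Claim_equal_noEmrip := by
  intro num Copy rev fc fv _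
  unfold Spec_noEmrip
  simp only [noEmrip, noEmrip_alt, fold_eq_ndiv]
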